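-- pv_equiv track=rewrite | github.com/Aeolitus/Sephrasto | src/Sephrasto/PdfExporter.py | getCellIndex
-- ===== SOURCE A (Python) =====
-- def getCellIndex(numElements, maxCells):
--     # This method maps elements to cell indices. It is used to keep alphabetical order in case of overflow
--     perCell = numElements // maxCells
--     extraCounter = numElements % maxCells
--     cellCounter = 1
--     cell = 0
--     cellIndex = [0]*numElements
--     for i in range(0, numElements):
--         cellIndex[i] = cell
--         pc = perCell
--         if extraCounter > 0:
--             pc += 1
--         if cellCounter < pc:
--             cellCounter += 1
--         else:
--             cellCounter = 1
--             cell += 1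
--             extraCounter -= 1
--     return cellIndex
-- ===== SOURCE B (Python) =====
-- def getCellIndex(numElements, maxCells):
--     # Compute each cell's share directly and expand it: cell c receives
--     # perCell elements, plus one extra for the first numElements % maxCells cells.
--     # Only cells that receive at least one element are visited.
--     perCell = numElements // maxCells
--     extra = numElements % maxCells
--     if perCell > 0:
--         cells = maxCells
--     elif perCell == 0:
--         cells = extra
--     else:
--         cells = 0
--     result = []
--     for c in range(cells):
--         result.extend([c] * (perCell + (1 if c < extra else 0)))
--     return result
-- ===== Notes on version B (the rewrite author's own statement) =====
-- stated objective: simpler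
-- what changed: Replaces A's per-element counter state machine (cellCounter/extraCounter updated at every element, writing into a preallocated list) with a per-cell expansion: compute each cell's size as perCell plus one extra for the first numElements%maxCells cells and emit the cell index that many times.
-- outside the precondition, e.g. on getCellIndex(5, -3): A returns [0, 1, 2, 3, 4], B returns []
import Mathlib
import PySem

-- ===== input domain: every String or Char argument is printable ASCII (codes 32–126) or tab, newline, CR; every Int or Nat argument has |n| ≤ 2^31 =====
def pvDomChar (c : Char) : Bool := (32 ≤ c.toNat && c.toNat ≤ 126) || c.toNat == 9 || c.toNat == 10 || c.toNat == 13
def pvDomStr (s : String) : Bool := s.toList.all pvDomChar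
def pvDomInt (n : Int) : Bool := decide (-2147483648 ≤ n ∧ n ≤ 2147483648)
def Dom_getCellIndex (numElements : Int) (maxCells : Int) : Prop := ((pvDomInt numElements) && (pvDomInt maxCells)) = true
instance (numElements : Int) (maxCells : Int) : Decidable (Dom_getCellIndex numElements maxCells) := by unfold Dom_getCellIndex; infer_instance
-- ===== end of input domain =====

-- B replaces A's per-element counter state machine with a build-sizes-then-expand pass (objective: simpler).

-- ===== PORT A =====
-- loop body of A's 'for i in range(0, numElements)'; state = (cellCounter, cell, extraCounter, cellIndex)
def getCellIndexStep (perCell : Int) (st : Int × Int × Int × List Int) (i : Int) : Int × Int × Int × List Int :=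
  match st with
  | (cellCounter, cell, extraCounter, cellIndex) =>
    -- cellIndex[i] = cell : i comes from range(0, numElements), so 0 ≤ i < len(cellIndex); List.set is exact here
    let cellIndex := cellIndex.set i.toNat cell
    let pc := perCell
    let pc := if extraCounter > 0 then pc + 1 else pc
    if cellCounter < pc then (cellCounter + 1, cell, extraCounter, cellIndex)
    else (1, cell + 1, extraCounter - 1, cellIndex)

def getCellIndex (numElements : Int) (maxCells : Int) : List Int :=
  let perCell := PySem.Int.floordiv numElements maxCells
  let extraCounter := PySem.Int.mod numElements maxCells
  -- [0]*numElements (empty for numElements ≤ 0, as in Python)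
  let cellIndex : List Int := List.replicate numElements.toNat 0
  ((PySem.List.pyRange 0 numElements 1).foldl (getCellIndexStep perCell)
    (1, 0, extraCounter, cellIndex)).2.2.2

-- ===== PORT B =====
def getCellIndex_alt (numElements : Int) (maxCells : Int) : List Int :=
  let perCell := PySem.Int.floordiv numElements maxCells
  let extra := PySem.Int.mod numElements maxCells
  let cells := if perCell > 0 then maxCells else if perCell = 0 then extra else 0
  (PySem.List.pyRange 0 cells 1).foldl
    (fun result c => result ++ List.replicate (perCell + (if c < extra then 1 else 0)).toNat c) []

-- ===== PRECONDITION & SPEC =====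
-- Pre_ excludes maxCells = 0, where A raises ZeroDivisionError, and the out-of-domain corner
-- maxCells < 0 with numElements > 0, where A's incrementing indices are an artefact of floor
-- division by a negative cell count (a cell count is naturally positive).
def Pre_getCellIndex (numElements : Int) (maxCells : Int) : Prop :=
  0 < maxCells ∨ (maxCells < 0 ∧ numElements ≤ 0)
instance (numElements : Int) (maxCells : Int) : Decidable (Pre_getCellIndex numElements maxCells) := by
  unfold Pre_getCellIndex; infer_instance

def pvWitness_getCellIndex : Int × Int := (7, 3)

def Spec_getCellIndex (numElements : Int) (maxCells : Int) (out : List Int) : Prop := out = getCellIndex_alt numElements maxCells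
instance (numElements : Int) (maxCells : Int) (out : List Int) : Decidable (Spec_getCellIndex numElements maxCells out) := by unfold Spec_getCellIndex; infer_instance

-- ===== CLAIM (what is proved, stated in full; the proofs are below) =====
def Claim_equal_getCellIndex : Prop := ∀ (numElements : Int) (maxCells : Int), Dom_getCellIndex numElements maxCells → Pre_getCellIndex numElements maxCells → Spec_getCellIndex numElements maxCells (getCellIndex numElements maxCells)

-- ===== LEMMAS AND PROOFS =====

-- the sequence of cell values A's loop writes, as a recursion on the remaining fuel
def emitA (perCell : Int) : Nat → Int → Int → Int → List Int
  | 0, _, _, _ => []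
  | k+1, extraCounter, cellCounter, cell =>
    let pc := if extraCounter > 0 then perCell + 1 else perCell
    cell :: (if cellCounter < pc then emitA perCell k extraCounter (cellCounter+1) cell
             else emitA perCell k (extraCounter-1) 1 (cell+1))

lemma take_set_eq (xs : List Int) (j : Nat) (a : Int) :
    (xs.set j a).take j = xs.take j := by
  apply List.ext_getElem
  · simp
  · intro i h1 h2
    simp only [List.length_take, List.length_set, lt_min_iff] at h1
    simp only [List.getElem_take, List.getElem_set]
    rw [if_neg (by omega)]

lemma set_take_succ (xs : List Int) (j : Nat) (a : Int) (h : j < xs.length) :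
    (xs.set j a).take (j+1) = xs.take j ++ [a] := by
  rw [List.take_add_one, take_set_eq]
  simp [h]

lemma loopA (perCell : Int) (k : Nat) : ∀ (j : Nat) (cc ce e : Int) (xs : List Int),
    xs.length = j + k →
    ((PySem.List.pyRange (j : Int) ((j : Int) + (k : Int)) 1).foldl (getCellIndexStep perCell)
      (cc, ce, e, xs)).2.2.2 = xs.take j ++ emitA perCell k e cc ce := by
  induction k with
  | zero =>
    intro j cc ce e xs h
    rw [show ((j:Int) + ((0:Nat):Int)) = (j:Int) from by push_cast; ring]
    rw [PySem.List.pyRange_one_eq_nil (le_refl _)]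
    simp only [List.foldl_nil, emitA, List.append_nil]
    rw [List.take_of_length_le (by omega)]
  | succ k ih =>
    intro j cc ce e xs h
    rw [PySem.List.pyRange_one_cons (by push_cast; omega)]
    rw [show PySem.List.pyRange ((j:Int)+1) ((j:Int)+(((k+1):Nat):Int)) 1
        = PySem.List.pyRange (((j+1:Nat)):Int) ((((j+1:Nat)):Int)+((k:Nat):Int)) 1 from by
      push_cast; ring_nf]
    rw [List.foldl_cons]
    have hj : j < xs.length := by omega
    simp only [getCellIndexStep, emitA, Int.toNat_natCast]
    split_ifs
    all_goals first
      | (rw [ih (j+1) (cc+1) ce e (xs.set j ce) (by simp only [List.length_set]; omega)]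
         rw [set_take_succ xs j ce hj, List.append_assoc, List.singleton_append])
      | (rw [ih (j+1) 1 (ce+1) (e-1) (xs.set j ce) (by simp only [List.length_set]; omega)]
         rw [set_take_succ xs j ce hj, List.append_assoc, List.singleton_append])

lemma emitA_cell (perCell : Int) (t rest : Nat) : ∀ (e cc cell : Int),
    cc + (t : Int) = (if 0 < e then perCell + 1 else perCell) →
    emitA perCell (t + 1 + rest) e cc cell
      = List.replicate (t+1) cell ++ emitA perCell rest (e-1) 1 (cell+1) := by
  induction t with
  | zero =>
    intro e cc cell h
    simp only [Nat.cast_zero, add_zero] at h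
    subst h
    rw [show 0+1+rest = rest+1 from by omega]
    simp only [emitA, if_neg (lt_irrefl _)]
    simp
  | succ t ih =>
    intro e cc cell h
    have hlt : cc < (if 0 < e then perCell + 1 else perCell) := by
      split at h <;> split <;> omega
    have : t + 1 + 1 + rest = (t + 1 + rest) + 1 := by omega
    rw [this]
    simp only [emitA, if_pos hlt]
    rw [ih e (cc+1) cell (by push_cast at h ⊢; omega)]
    simp [List.replicate_succ]

lemma emitA_expand (perCell : Int) (hp : 0 ≤ perCell) (mleft : Nat) : ∀ (e cell : Int),
    e ≤ (mleft : Int) →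
    emitA perCell (perCell * (mleft : Int) + max e 0).toNat e 1 cell
      = ((List.range mleft).map
          (fun (i : Nat) => List.replicate (perCell + if (i : Int) < e then 1 else 0).toNat (cell + (i : Int)))).flatten := by
  induction mleft with
  | zero =>
    intro e cell he
    simp only [Nat.cast_zero] at he ⊢
    have hmax : max e 0 = 0 := by omega
    simp [emitA, hmax]
  | succ m ih =>
    intro e cell he
    by_cases h0 : perCell = 0 ∧ e ≤ 0
    · obtain ⟨hp0, he0⟩ := h0
      subst hp0
      have hmax : max e 0 = 0 := by omega
      have hz : ∀ i : Nat, ((0:Int) + if (i:Int) < e then 1 else 0).toNat = 0 := by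
        intro i
        rw [if_neg (by omega)]
        simp
      have hfuel0 : ((0:Int) * (((m+1:Nat)):Int) + max e 0).toNat = 0 := by
        rw [zero_mul, zero_add, hmax]
        rfl
      rw [hfuel0]
      show ([] : List Int) = _
      symm
      simp
      intro a _
      rw [if_neg (by omega)]
    · have h0' : perCell = 0 → 0 < e := by
        intro hp0
        by_contra hc
        exact h0 ⟨hp0, by omega⟩
      have hsize0 : 1 ≤ (if 0 < e then perCell + 1 else perCell) := by
        rcases Int.lt_or_le 0 e with h|h
        · rw [if_pos h]; omega
        · rw [if_neg (by omega)]
          rcases Int.lt_or_le 0 perCell with h2|h2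
          · omega
          · exact absurd (h0' (by omega)) (by omega)
      have ht : (((if 0 < e then perCell + 1 else perCell) - 1).toNat : Int)
          = (if 0 < e then perCell + 1 else perCell) - 1 := Int.toNat_of_nonneg (by omega)
      have hq : 0 ≤ perCell * (m:Int) := mul_nonneg hp (by positivity)
      have hlin : perCell * (((m:Nat):Int)+1) = perCell * ((m:Nat):Int) + perCell := by ring
      have hfuel : (perCell * (((m+1:Nat)):Int) + max e 0).toNat
          = ((if 0 < e then perCell + 1 else perCell) - 1).toNat + 1
            + (perCell * ((m:Nat):Int) + max (e-1) 0).toNat := by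
        rcases Int.lt_or_le 0 e with h|h
        · rw [if_pos h] at ht ⊢
          push_cast
          omega
        · rw [if_neg (by omega)] at ht ⊢
          push_cast
          omega
      rw [hfuel, emitA_cell perCell _ _ e 1 cell (by omega)]
      rw [ih (e-1) (cell+1) (by push_cast at he ⊢; omega)]
      rw [List.range_succ_eq_map, List.map_cons, List.flatten_cons, List.map_map]
      congr 1
      · norm_num
        split_ifs at hsize0 ⊢ <;> omega
      · congr 1
        apply List.map_congr_left
        intro i hi
        simp only [Function.comp, Nat.succ_eq_add_one, Nat.cast_add, Nat.cast_one]
        rw [if_congr (show ((i:Int) < e - 1) ↔ ((i:Int) + 1 < e) from by omega) rfl rfl]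
        ring_nf

lemma flatten_map_range_add_empty (f : Nat → List Int) (a b : Nat)
    (h : ∀ i, a ≤ i → f i = []) :
    ((List.range (a + b)).map f).flatten = ((List.range a).map f).flatten := by
  rw [List.range_add, List.map_append, List.flatten_append]
  have h2 : ((List.range b).map (a + ·)).map f = (List.range b).map (fun _ => ([] : List Int)) := by
    rw [List.map_map]
    apply List.map_congr_left
    intro i _
    exact h (a + i) (by omega)
  rw [h2]
  simp

lemma flatten_zero_tail (e : Int) (mt : Nat) (hle : e.toNat ≤ mt) :
    ((List.range mt).map
        (fun (i : Nat) => List.replicate (if (i:Int) < e then (1:Int) else 0).toNat ((i:Int)))).flatten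
      = ((List.range e.toNat).map
          (fun (i : Nat) => List.replicate (if (i:Int) < e then (1:Int) else 0).toNat ((i:Int)))).flatten := by
  rw [show mt = e.toNat + (mt - e.toNat) from by omega]
  apply flatten_map_range_add_empty
  intro i hi
  rw [if_neg (by omega)]
  simp

lemma altB (numElements maxCells : Int) :
    getCellIndex_alt numElements maxCells
      = ((List.range (if PySem.Int.floordiv numElements maxCells > 0 then maxCells
            else if PySem.Int.floordiv numElements maxCells = 0 then PySem.Int.mod numElements maxCells
            else 0).toNat).map
          (fun (i : Nat) => List.replicate
            (PySem.Int.floordiv numElements maxCells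
              + if (i : Int) < PySem.Int.mod numElements maxCells then 1 else 0).toNat
            ((i : Int)))).flatten := by
  simp only [getCellIndex_alt]
  rw [PySem.List.pyRange_one, PySem.List.foldl_append_eq_flatMap]
  simp only [sub_zero, zero_add]
  rw [List.flatMap_def, List.map_map]
  rfl

-- ===== VERDICT (by name: the statement is the Claim_ definition above) =====
theorem getCellIndex_spec : Claim_equal_getCellIndex := by
  intro n m _ hpre
  unfold Spec_getCellIndex
  rcases hpre with hm | ⟨hm, hn⟩
  · rcases Int.lt_or_le n 0 with hn | hn
    · -- 0 < m, n < 0 : both sides are []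
      have hpc : PySem.Int.floordiv n m < 0 :=
        (PySem.Int.floordiv_lt_iff_lt_mul hm).mpr (by omega)
      have hA : getCellIndex n m = [] := by
        unfold getCellIndex
        rw [PySem.List.pyRange_one_eq_nil (by omega)]
        simp [Int.toNat_of_nonpos (by omega : n ≤ 0)]
      have hB : getCellIndex_alt n m = [] := by
        simp only [getCellIndex_alt]
        rw [if_neg (by omega), if_neg (by omega)]
        rw [PySem.List.pyRange_one_eq_nil (le_refl 0)]
        rfl
      rw [hA, hB]
    · -- 0 < m, 0 ≤ n : the main case
      have hpc : 0 ≤ PySem.Int.floordiv n m :=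
        (PySem.Int.le_floordiv_iff_mul_le hm).mpr (by omega)
      have hmod0 : 0 ≤ PySem.Int.mod n m := PySem.Int.mod_nonneg (a := n) hm
      have hmodlt : PySem.Int.mod n m < m := PySem.Int.mod_lt (a := n) hm
      have hsum : PySem.Int.floordiv n m * m + PySem.Int.mod n m = n :=
        PySem.Int.floordiv_mul_add_mod n m
      unfold getCellIndex
      rw [show PySem.List.pyRange 0 n 1
          = PySem.List.pyRange (((0:Nat)):Int) ((((0:Nat)):Int) + ((n.toNat:Nat):Int)) 1 from by
        norm_num [Int.toNat_of_nonneg hn]]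
      rw [loopA (PySem.Int.floordiv n m) n.toNat 0 1 0 (PySem.Int.mod n m)
            (List.replicate n.toNat 0) (by simp)]
      rw [altB n m]
      have hmc : ((m.toNat : Nat) : Int) = m := Int.toNat_of_nonneg (le_of_lt hm)
      have hfuel : n.toNat
          = (PySem.Int.floordiv n m * ((m.toNat : Nat) : Int)
              + max (PySem.Int.mod n m) 0).toNat := by
        rw [hmc, max_eq_left hmod0]
        have hq := hsum
        set q := PySem.Int.floordiv n m * m with hqdef
        omega
      rw [List.take_zero, List.nil_append, hfuel,
          emitA_expand (PySem.Int.floordiv n m) hpc m.toNat (PySem.Int.mod n m) 0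
            (by rw [hmc]; omega)]
      by_cases hpos : PySem.Int.floordiv n m > 0
      · rw [if_pos hpos]
        simp
      · have hpc0 : PySem.Int.floordiv n m = 0 := by omega
        rw [hpc0]
        norm_num
        exact flatten_zero_tail (PySem.Int.mod n m) m.toNat (by omega)
  · -- m < 0, n ≤ 0 : both sides are []
    have hA : getCellIndex n m = [] := by
      unfold getCellIndex
      rw [PySem.List.pyRange_one_eq_nil (by omega)]
      simp [Int.toNat_of_nonpos hn]
    have hB : getCellIndex_alt n m = [] := by
      obtain ⟨hmb1, hmb2⟩ := PySem.Int.mod_neg_bounds (a := n) hm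
      simp only [getCellIndex_alt]
      split_ifs <;> (rw [PySem.List.pyRange_one_eq_nil (by omega)]; rfl)
    rw [hA, hB]
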